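-- pv_equiv track=rewrite | github.com/take4ff/gmp | old_file/20250710/20250706_filter6.py | process_length_group_batch
-- ===== SOURCE A (Python) =====
-- def is_sublist_ultrafast(sublist, mainlist):
--     """超高速サブリストチェック（最適化済み）"""
--     if not sublist:
--         return True
--     if len(sublist) > len(mainlist):
--         return False
--
--     # 長さ1の場合は高速チェック
--     if len(sublist) == 1:
--         return sublist[0] in mainlist
--
--     # 最初と最後の要素の事前チェック
--     first_item = sublist[0]
--     last_item = sublist[-1]
--
--     if first_item not in mainlist or last_item not in mainlist:
--         return False
--
--     # Boyer-Moore風の最適化：最初の要素の位置を効率的に検索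
--     sublist_len = len(sublist)
--     mainlist_len = len(mainlist)
--
--     for i in range(mainlist_len - sublist_len + 1):
--         if mainlist[i] == first_item:
--             # 最後の要素もチェック
--             if mainlist[i + sublist_len - 1] == last_item:
--                 # 全体の比較
--                 if mainlist[i:i + sublist_len] == sublist:
--                     return True
--
--     return False
--
-- def process_length_group_batch(args):
--     """長さグループの並列処理用関数"""
--     current_group, longer_groups_data, current_length, batch_id = args
--
--     non_encompassed = []
--     processed_count = 0
--
--     for seq in current_group:
--         processed_count += 1
--         is_encompassed = False
--         seq_set = set(seq)
--
--         # より長いグループとのみ比較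
--         for longer_length, longer_group in longer_groups_data:
--             if longer_length <= current_length:
--                 continue
--
--             # 各長いシーケンスとの比較
--             for longer_seq in longer_group:
--                 # 高速事前チェック1: セット包含
--                 longer_set = set(longer_seq)
--                 if not seq_set.issubset(longer_set):
--                     continue
--
--                 # 高速事前チェック2: 最初と最後の要素
--                 if seq[0] not in longer_seq or seq[-1] not in longer_seq:
--                     continue
--
--                 # 実際の順序チェック
--                 if is_sublist_ultrafast(seq, longer_seq):
--                     is_encompassed = True
--                     break
--
--             if is_encompassed:
--                 break
--
--         if not is_encompassed:
--             non_encompassed.append(seq)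
--
--     return non_encompassed, processed_count, batch_id
-- ===== SOURCE B (Python) =====
-- def process_length_group_batch(args):
--     current_group, longer_groups_data, current_length, batch_id = args
--     # Alternative algorithm: precompute one hash index of all contiguous slices
--     # (of the lengths occurring in current_group) of every applicable longer sequence;
--     # each seq is then a single set lookup instead of a scan over all longer sequences.
--     lengths = {len(s) for s in current_group}
--     index = set()
--     for longer_length, longer_group in longer_groups_data:
--         if longer_length > current_length:
--             for ls in longer_group:
--                 L = len(ls)
--                 for n in lengths:
--                     for i in range(L - n + 1):
--                         index.add(tuple(ls[i:i + n]))
--     non_encompassed = [s for s in current_group if tuple(s) not in index]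
--     return non_encompassed, len(current_group), batch_id
-- ===== Notes on version B (the rewrite author's own statement) =====
-- stated objective: alternative
-- what changed: Instead of testing each sequence against every longer sequence with a hand-rolled substring scan, B precomputes one hash set of all contiguous slices (of the lengths occurring in the current group) of the applicable longer sequences, so each sequence is decided by a single set lookup.
import Mathlib
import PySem

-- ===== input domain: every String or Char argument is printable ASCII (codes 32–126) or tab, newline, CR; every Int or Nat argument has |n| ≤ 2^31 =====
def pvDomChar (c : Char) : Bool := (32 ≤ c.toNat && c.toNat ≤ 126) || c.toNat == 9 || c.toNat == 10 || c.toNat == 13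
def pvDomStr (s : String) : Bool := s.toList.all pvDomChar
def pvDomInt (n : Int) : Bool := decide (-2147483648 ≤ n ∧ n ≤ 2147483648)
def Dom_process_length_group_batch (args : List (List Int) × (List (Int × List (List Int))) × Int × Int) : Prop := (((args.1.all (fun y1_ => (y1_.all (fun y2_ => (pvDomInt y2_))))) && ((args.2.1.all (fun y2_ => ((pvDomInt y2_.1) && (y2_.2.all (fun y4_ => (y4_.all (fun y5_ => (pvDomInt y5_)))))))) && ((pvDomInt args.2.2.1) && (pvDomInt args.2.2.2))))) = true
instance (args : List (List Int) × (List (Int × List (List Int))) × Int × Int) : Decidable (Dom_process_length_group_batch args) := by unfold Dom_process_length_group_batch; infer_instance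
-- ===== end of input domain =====

-- B replaces A's per-pair substring scans by one precomputed hash set of all contiguous
-- slices (of the lengths occurring in the current group) of the applicable longer
-- sequences; each sequence is then decided by a single set lookup (objective: alternative).

-- ===== PORT A =====
def is_sublist_ultrafast (sublist mainlist : List Int) : Bool :=
  if sublist = [] then true
  else if mainlist.length < sublist.length then false
  else if sublist.length = 1 then
    mainlist.contains (PySem.List.pyGetD sublist 0 0)
  else
    let first_item := PySem.List.pyGetD sublist 0 0
    let last_item := PySem.List.pyGetD sublist (-1) 0
    if !(mainlist.contains first_item) || !(mainlist.contains last_item) then false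
    else
      (PySem.List.pyRange 0 ((mainlist.length : Int) - (sublist.length : Int) + 1) 1).any
        (fun i =>
          PySem.List.pyGetD mainlist i 0 == first_item &&
          (PySem.List.pyGetD mainlist (i + (sublist.length : Int) - 1) 0 == last_item &&
            (PySem.List.slice mainlist (some i) (some (i + (sublist.length : Int))) == sublist)))

def process_length_group_batch (args : List (List Int) × (List (Int × List (List Int))) × Int × Int) : List (List Int) × Int × Int :=
  let current_group := args.1
  let longer_groups_data := args.2.1
  let current_length := args.2.2.1
  let batch_id := args.2.2.2
  let st := current_group.foldl (fun (st : List (List Int) × Int) seq =>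
    let seq_set : PySem.Set Int := PySem.Set.ofList seq
    let is_encompassed := longer_groups_data.any (fun p =>
      decide (current_length < p.1) &&
      p.2.any (fun longer_seq =>
        PySem.Set.issubset seq_set (PySem.Set.ofList longer_seq) &&
        (longer_seq.contains (PySem.List.pyGetD seq 0 0) &&
         (longer_seq.contains (PySem.List.pyGetD seq (-1) 0) &&
          is_sublist_ultrafast seq longer_seq))))
    (if is_encompassed then st.1 else st.1 ++ [seq], st.2 + 1)) ([], 0)
  (st.1, st.2, batch_id)

-- ===== PORT B =====
def process_length_group_batch_alt (args : List (List Int) × (List (Int × List (List Int))) × Int × Int) : List (List Int) × Int × Int :=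
  let current_group := args.1
  let longer_groups_data := args.2.1
  let current_length := args.2.2.1
  let batch_id := args.2.2.2
  let lengths : PySem.Set Int := PySem.Set.ofList (current_group.map (fun s => (s.length : Int)))
  let index : PySem.Set (List Int) := longer_groups_data.foldl (fun idx p =>
    if current_length < p.1 then
      p.2.foldl (fun idx ls =>
        lengths.foldl (fun idx n =>
          (PySem.List.pyRange 0 ((ls.length : Int) - n + 1) 1).foldl
            (fun idx i => PySem.Set.add idx (PySem.List.slice ls (some i) (some (i + n)))) idx)
          idx) idx
    else idx) PySem.Set.empty
  (current_group.filter (fun s => !(PySem.Set.contains index s)), (current_group.length : Int), batch_id)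

-- ===== PRECONDITION & SPEC =====
-- Pre_ excludes exactly the inputs where A raises IndexError: an empty sequence in
-- current_group together with a non-empty applicable longer group (seq[0] on []).
def Pre_process_length_group_batch (args : List (List Int) × (List (Int × List (List Int))) × Int × Int) : Prop :=
  ¬ (([] : List Int) ∈ args.1 ∧ ∃ p ∈ args.2.1, args.2.2.1 < p.1 ∧ p.2 ≠ [])
instance (args : List (List Int) × (List (Int × List (List Int))) × Int × Int) : Decidable (Pre_process_length_group_batch args) := by unfold Pre_process_length_group_batch; infer_instance

def pvWitness_process_length_group_batch : (List (List Int) × (List (Int × List (List Int))) × Int × Int) :=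
  ([[1, 2], [3]], [(3, [[0, 1, 2], [4, 5, 6]])], 2, 0)

def Spec_process_length_group_batch (args : List (List Int) × (List (Int × List (List Int))) × Int × Int) (out : List (List Int) × Int × Int) : Prop := out = process_length_group_batch_alt args
instance (args : List (List Int) × (List (Int × List (List Int))) × Int × Int) (out : List (List Int) × Int × Int) : Decidable (Spec_process_length_group_batch args out) := by unfold Spec_process_length_group_batch; infer_instance

-- ===== CLAIM (what is proved, stated in full; the proofs are below) =====
def Claim_equal_process_length_group_batch : Prop := ∀ (args : List (List Int) × (List (Int × List (List Int))) × Int × Int), Dom_process_length_group_batch args → Pre_process_length_group_batch args → Spec_process_length_group_batch args (process_length_group_batch args)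


-- ===== LEMMAS AND PROOFS =====

def Matches (seq ls : List Int) : Prop := ∃ k : Nat, (ls.drop k).take seq.length = seq
lemma matches_le {seq ls : List Int} {k : Nat} (hne : seq ≠ [])
    (h : (ls.drop k).take seq.length = seq) : k + seq.length ≤ ls.length := by
  have hl := congrArg List.length h
  simp [List.length_take, List.length_drop] at hl
  have h0 : seq.length ≠ 0 := by simpa using hne
  omega
lemma matches_mem {seq ls : List Int} {k : Nat}
    (h : (ls.drop k).take seq.length = seq) : ∀ x ∈ seq, x ∈ ls := by
  intro x hx
  rw [← h] at hx
  exact List.mem_of_mem_drop (List.mem_of_mem_take hx)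
lemma matches_getElem {seq ls : List Int} {k : Nat}
    (h : (ls.drop k).take seq.length = seq) (j : Nat) (hj : j < seq.length)
    (hkj : k + j < ls.length) : seq[j] = ls[k + j] := by
  rw [List.getElem_of_eq h.symm hj]
  simp [List.getElem_take, List.getElem_drop]

lemma pyGetD_first {seq : List Int} (hne : seq ≠ []) :
    PySem.List.pyGetD seq 0 0 = seq[0]'(List.length_pos_iff.mpr hne) := by
  cases seq with
  | nil => exact absurd rfl hne
  | cons x xs => simp [PySem.List.pyGetD_zero_cons]

lemma pyGetD_last {seq : List Int} (hne : seq ≠ []) :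
    PySem.List.pyGetD seq (-1) 0 = seq[seq.length - 1]'(by
      have := List.length_pos_iff.mpr hne; omega) := by
  rw [PySem.List.pyGetD_neg_one seq 0 hne, List.getLast_eq_getElem]

lemma is_sublist_iff {seq ls : List Int} (hne : seq ≠ []) :
    is_sublist_ultrafast seq ls = true ↔ Matches seq ls := by
  have hpos : 0 < seq.length := List.length_pos_iff.mpr hne
  unfold is_sublist_ultrafast
  rw [if_neg hne]
  by_cases hlen : ls.length < seq.length
  · rw [if_pos hlen]
    constructor
    · intro h
      exact absurd h (by decide)
    · rintro ⟨k, hk⟩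
      exact absurd (matches_le hne hk) (by omega)
  · rw [if_neg hlen]
    by_cases h1 : seq.length = 1
    · rw [if_pos h1]
      obtain ⟨x, rfl⟩ : ∃ x, seq = [x] := by
        match seq, h1 with | [x], _ => exact ⟨x, rfl⟩
      simp only [PySem.List.pyGetD_zero_cons, List.contains_eq_mem, decide_eq_true_eq]
      constructor
      · intro hx
        obtain ⟨k, hk, hxk⟩ := List.mem_iff_getElem.mp hx
        refine ⟨k, ?_⟩
        rw [← List.getElem_cons_drop hk]
        simp [hxk]
      · rintro ⟨k, hk⟩
        exact matches_mem hk x (by simp)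
    · rw [if_neg h1]
      simp only []
      split_ifs with hg
      · constructor
        · intro h
          exact absurd h (by decide)
        · rintro ⟨k, hk⟩
          rw [pyGetD_first hne, pyGetD_last hne] at hg
          have h0 : seq[0]'hpos ∈ ls := matches_mem hk _ (List.getElem_mem _)
          have hl : seq[seq.length - 1]'(by omega) ∈ ls := matches_mem hk _ (List.getElem_mem _)
          simp [h0, hl] at hg
      · rw [List.any_eq_true]
        constructor
        · rintro ⟨i, hi, hp⟩
          rw [PySem.List.mem_pyRange_one] at hi
          simp only [Bool.and_eq_true, beq_iff_eq] at hp
          obtain ⟨-, -, hs⟩ := hp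
          rw [PySem.List.slice_toNat ls hi.1 (by omega)] at hs
          have : (i + (seq.length : Int)).toNat - i.toNat = seq.length := by omega
          rw [this] at hs
          exact ⟨i.toNat, hs⟩
        · rintro ⟨k, hk⟩
          have hle := matches_le hne hk
          refine ⟨(k : Int), ?_, ?_⟩
          · rw [PySem.List.mem_pyRange_one]
            exact ⟨by positivity, by omega⟩
          · simp only [Bool.and_eq_true, beq_iff_eq]
            refine ⟨?_, ?_, ?_⟩
            · rw [pyGetD_first hne, PySem.List.pyGetD_eq_getElem ls 0 (by positivity) (by omega)]
              have := matches_getElem hk 0 hpos (by omega)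
              simpa using this.symm
            · rw [pyGetD_last hne]
              have hcast : (k : Int) + (seq.length : Int) - 1 = ((k + (seq.length - 1) : Nat) : Int) := by
                push_cast; omega
              rw [hcast, PySem.List.pyGetD_natCast]
              rw [List.getD_eq_getElem _ _ (by omega)]
              exact (matches_getElem hk (seq.length - 1) (by omega) (by omega)).symm
            · rw [show (k : Int) + (seq.length : Int) = ((k : Int) + ((seq.length : Nat) : Int)) from rfl]
              rw [PySem.List.slice_natCast_add ls k seq.length]
              exact hk
lemma checkA_iff {seq ls : List Int} (hne : seq ≠ []) :
    (PySem.Set.issubset (PySem.Set.ofList seq) (PySem.Set.ofList ls) = true ∧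
      ls.contains (PySem.List.pyGetD seq 0 0) = true ∧
       ls.contains (PySem.List.pyGetD seq (-1) 0) = true ∧
        is_sublist_ultrafast seq ls = true) ↔ Matches seq ls := by
  have hpos : 0 < seq.length := List.length_pos_iff.mpr hne
  constructor
  · rintro ⟨-, -, -, h⟩
    exact (is_sublist_iff hne).mp h
  · rintro ⟨k, hk⟩
    refine ⟨?_, ?_, ?_, (is_sublist_iff hne).mpr ⟨k, hk⟩⟩
    · rw [PySem.Set.issubset_iff]
      intro x hx
      rw [PySem.Set.mem_ofList] at hx ⊢
      exact matches_mem hk x hx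
    · rw [pyGetD_first hne]
      simp only [List.contains_eq_mem, decide_eq_true_eq]
      exact matches_mem hk _ (List.getElem_mem _)
    · rw [pyGetD_last hne]
      simp only [List.contains_eq_mem, decide_eq_true_eq]
      exact matches_mem hk _ (List.getElem_mem _)

def EncProp (cl : Int) (data : List (Int × List (List Int))) (seq : List Int) : Prop :=
  ∃ p ∈ data, cl < p.1 ∧ ∃ ls ∈ p.2, Matches seq ls

lemma encA_iff (cl : Int) (data : List (Int × List (List Int))) {seq : List Int} (hne : seq ≠ []) :
    (data.any (fun p =>
      decide (cl < p.1) &&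
      p.2.any (fun longer_seq =>
        PySem.Set.issubset (PySem.Set.ofList seq) (PySem.Set.ofList longer_seq) &&
        (longer_seq.contains (PySem.List.pyGetD seq 0 0) &&
         (longer_seq.contains (PySem.List.pyGetD seq (-1) 0) &&
          is_sublist_ultrafast seq longer_seq))))) = true ↔ EncProp cl data seq := by
  simp only [List.any_eq_true, Bool.and_eq_true, decide_eq_true_eq]
  unfold EncProp
  constructor
  · rintro ⟨p, hp, hcl, ls, hls, hchk⟩
    exact ⟨p, hp, hcl, ls, hls, (checkA_iff hne).mp hchk⟩
  · rintro ⟨p, hp, hcl, ls, hls, hm⟩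
    exact ⟨p, hp, hcl, ls, hls, (checkA_iff hne).mpr hm⟩

lemma mem_foldl_of_mem_iff {α β : Type} [BEq α] [LawfulBEq α]
    (g : PySem.Set α → β → PySem.Set α) (P : β → α → Prop)
    (hg : ∀ s b y, y ∈ g s b ↔ y ∈ s ∨ P b y) :
    ∀ (l : List β) (s : PySem.Set α) (y : α),
      y ∈ l.foldl g s ↔ y ∈ s ∨ ∃ b ∈ l, P b y := by
  intro l
  induction l with
  | nil => simp
  | cons b bs ih =>
    intro s y
    simp only [List.foldl_cons, ih, hg, List.mem_cons]
    constructor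
    · rintro ((h | h) | ⟨b', hb', h⟩)
      · exact Or.inl h
      · exact Or.inr ⟨b, Or.inl rfl, h⟩
      · exact Or.inr ⟨b', Or.inr hb', h⟩
    · rintro (h | ⟨b', (rfl | hb'), h⟩)
      · exact Or.inl (Or.inl h)
      · exact Or.inl (Or.inr h)
      · exact Or.inr ⟨b', hb', h⟩

lemma mem_inner2 (lengths : PySem.Set Int) (ls : List Int) (s : PySem.Set (List Int)) (y : List Int) :
    y ∈ lengths.foldl (fun idx n =>
        (PySem.List.pyRange 0 ((ls.length : Int) - n + 1) 1).foldl
          (fun idx i => PySem.Set.add idx (PySem.List.slice ls (some i) (some (i + n)))) idx) s ↔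
    y ∈ s ∨ ∃ n ∈ lengths, ∃ i ∈ PySem.List.pyRange 0 ((ls.length : Int) - n + 1) 1,
      y = PySem.List.slice ls (some i) (some (i + n)) := by
  apply mem_foldl_of_mem_iff
  intro s n y
  exact PySem.Set.mem_foldl_add _ (fun i => PySem.List.slice ls (some i) (some (i + n))) s y

lemma mem_inner3 (lengths : PySem.Set Int) (lg : List (List Int)) (s : PySem.Set (List Int)) (y : List Int) :
    y ∈ lg.foldl (fun idx ls =>
        lengths.foldl (fun idx n =>
          (PySem.List.pyRange 0 ((ls.length : Int) - n + 1) 1).foldl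
            (fun idx i => PySem.Set.add idx (PySem.List.slice ls (some i) (some (i + n)))) idx) idx) s ↔
    y ∈ s ∨ ∃ ls ∈ lg, ∃ n ∈ lengths, ∃ i ∈ PySem.List.pyRange 0 ((ls.length : Int) - n + 1) 1,
      y = PySem.List.slice ls (some i) (some (i + n)) := by
  apply mem_foldl_of_mem_iff
  intro s ls y
  exact mem_inner2 lengths ls s y

lemma mem_index_iff (cl : Int) (data : List (Int × List (List Int))) (lengths : PySem.Set Int) (y : List Int) :
    y ∈ data.foldl (fun idx p =>
        if cl < p.1 then
          p.2.foldl (fun idx ls =>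
            lengths.foldl (fun idx n =>
              (PySem.List.pyRange 0 ((ls.length : Int) - n + 1) 1).foldl
                (fun idx i => PySem.Set.add idx (PySem.List.slice ls (some i) (some (i + n)))) idx) idx) idx
        else idx) PySem.Set.empty ↔
    ∃ p ∈ data, cl < p.1 ∧ ∃ ls ∈ p.2, ∃ n ∈ lengths,
      ∃ i ∈ PySem.List.pyRange 0 ((ls.length : Int) - n + 1) 1,
        y = PySem.List.slice ls (some i) (some (i + n)) := by
  rw [mem_foldl_of_mem_iff _
    (fun p y => cl < p.1 ∧ ∃ ls ∈ p.2, ∃ n ∈ lengths,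
      ∃ i ∈ PySem.List.pyRange 0 ((ls.length : Int) - n + 1) 1,
        y = PySem.List.slice ls (some i) (some (i + n)))
    (fun s p y => by
      split_ifs with hcl
      · rw [mem_inner3]
        simp [hcl]
      · simp [hcl])
    data PySem.Set.empty y]
  simp [PySem.Set.empty]

lemma encB_iff (cl : Int) (data : List (Int × List (List Int))) (group : List (List Int))
    {seq : List Int} (hseq : seq ∈ group) (hne : seq ≠ []) :
    (PySem.Set.contains (data.foldl (fun idx p =>
        if cl < p.1 then
          p.2.foldl (fun idx ls =>
            (PySem.Set.ofList (group.map (fun s => (s.length : Int)))).foldl (fun idx n =>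
              (PySem.List.pyRange 0 ((ls.length : Int) - n + 1) 1).foldl
                (fun idx i => PySem.Set.add idx (PySem.List.slice ls (some i) (some (i + n)))) idx) idx) idx
        else idx) PySem.Set.empty) seq) = true ↔ EncProp cl data seq := by
  rw [PySem.Set.contains_iff, mem_index_iff]
  unfold EncProp
  constructor
  · rintro ⟨p, hp, hcl, ls, hls, n, hn, i, hi, hy⟩
    refine ⟨p, hp, hcl, ls, hls, ?_⟩
    rw [PySem.List.mem_pyRange_one] at hi
    have hn0 : 0 ≤ n := by
      rw [PySem.Set.mem_ofList] at hn
      obtain ⟨s, -, rfl⟩ := List.mem_map.mp hn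
      positivity
    rw [PySem.List.slice_toNat ls hi.1 (by omega)] at hy
    have hlen : seq.length = (i + n).toNat - i.toNat := by
      have hc := congrArg List.length hy
      simp [List.length_take, List.length_drop] at hc
      omega
    refine ⟨i.toNat, ?_⟩
    rw [hlen, ← hy]
  · rintro ⟨p, hp, hcl, ls, hls, k, hk⟩
    have hle := matches_le hne hk
    refine ⟨p, hp, hcl, ls, hls, (seq.length : Int), ?_, (k : Int), ?_, ?_⟩
    · rw [PySem.Set.mem_ofList]
      exact List.mem_map.mpr ⟨seq, hseq, rfl⟩
    · rw [PySem.List.mem_pyRange_one]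
      refine ⟨by positivity, by omega⟩
    · rw [PySem.List.slice_natCast_add ls k seq.length]
      exact hk.symm

lemma foldl_keep (f : List Int → Bool) (g : List (List Int)) (acc : List (List Int)) (c : Int) :
    g.foldl (fun (st : List (List Int) × Int) seq =>
        (if f seq then st.1 else st.1 ++ [seq], st.2 + 1)) (acc, c)
      = (acc ++ g.filter (fun s => !f s), c + g.length) := by
  induction g generalizing acc c with
  | nil => simp
  | cons x xs ih =>
    simp only [List.foldl_cons, List.filter_cons]
    by_cases hx : f x <;> simp [hx, ih, List.append_assoc] <;> omega


-- ===== VERDICT (by name: the statement is the Claim_ definition above) =====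
theorem process_length_group_batch_spec : Claim_equal_process_length_group_batch := by
  unfold Claim_equal_process_length_group_batch
  intro args _ hpre
  obtain ⟨group, data, cl, bid⟩ := args
  unfold Pre_process_length_group_batch at hpre
  dsimp only at hpre
  unfold Spec_process_length_group_batch process_length_group_batch process_length_group_batch_alt
  dsimp only
  rw [foldl_keep (fun seq => data.any (fun p =>
      decide (cl < p.1) &&
      p.2.any (fun longer_seq =>
        PySem.Set.issubset (PySem.Set.ofList seq) (PySem.Set.ofList longer_seq) &&
        (longer_seq.contains (PySem.List.pyGetD seq 0 0) &&
         (longer_seq.contains (PySem.List.pyGetD seq (-1) 0) &&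
          is_sublist_ultrafast seq longer_seq))))) group [] 0]
  simp only [List.nil_append, zero_add]
  have hall : ([] : List Int) ∈ group → ∀ p ∈ data, cl < p.1 → p.2 = [] := by
    intro hmem p hp hcl
    by_contra hne
    exact hpre ⟨hmem, p, hp, hcl, hne⟩
  have hfil : List.filter (fun s => !(data.any (fun p =>
      decide (cl < p.1) &&
      p.2.any (fun longer_seq =>
        PySem.Set.issubset (PySem.Set.ofList s) (PySem.Set.ofList longer_seq) &&
        (longer_seq.contains (PySem.List.pyGetD s 0 0) &&
         (longer_seq.contains (PySem.List.pyGetD s (-1) 0) &&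
          is_sublist_ultrafast s longer_seq)))))) group
      = List.filter (fun s => !(PySem.Set.contains (data.foldl (fun idx p =>
          if cl < p.1 then
            p.2.foldl (fun idx ls =>
              (PySem.Set.ofList (group.map (fun s => (s.length : Int)))).foldl (fun idx n =>
                (PySem.List.pyRange 0 ((ls.length : Int) - n + 1) 1).foldl
                  (fun idx i => PySem.Set.add idx (PySem.List.slice ls (some i) (some (i + n)))) idx) idx) idx
          else idx) PySem.Set.empty) s)) group := by
    apply List.filter_congr
    intro s hs
    by_cases hsnil : s = []
    · subst hsnil
      have hA : (data.any (fun p =>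
          decide (cl < p.1) &&
          p.2.any (fun longer_seq =>
            PySem.Set.issubset (PySem.Set.ofList ([] : List Int)) (PySem.Set.ofList longer_seq) &&
            (longer_seq.contains (PySem.List.pyGetD ([] : List Int) 0 0) &&
             (longer_seq.contains (PySem.List.pyGetD ([] : List Int) (-1) 0) &&
              is_sublist_ultrafast [] longer_seq))))) = false := by
        rw [List.any_eq_false]
        intro p hp
        by_cases hcl : cl < p.1
        · rw [hall hs p hp hcl]
          simp
        · simp [hcl]
      have hB : (PySem.Set.contains (data.foldl (fun idx p =>
          if cl < p.1 then
            p.2.foldl (fun idx ls =>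
              (PySem.Set.ofList (group.map (fun s => (s.length : Int)))).foldl (fun idx n =>
                (PySem.List.pyRange 0 ((ls.length : Int) - n + 1) 1).foldl
                  (fun idx i => PySem.Set.add idx (PySem.List.slice ls (some i) (some (i + n)))) idx) idx) idx
          else idx) PySem.Set.empty) ([] : List Int)) = false := by
        rw [Bool.eq_false_iff]
        intro hc
        rw [PySem.Set.contains_iff, mem_index_iff] at hc
        obtain ⟨p, hp, hcl, ls, hls, -⟩ := hc
        rw [hall hs p hp hcl] at hls
        exact absurd hls (List.not_mem_nil)
      rw [hA, hB]
    · have h1 := encA_iff cl data hsnil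
      have h2 := encB_iff cl data group hs hsnil
      have : (data.any (fun p =>
          decide (cl < p.1) &&
          p.2.any (fun longer_seq =>
            PySem.Set.issubset (PySem.Set.ofList s) (PySem.Set.ofList longer_seq) &&
            (longer_seq.contains (PySem.List.pyGetD s 0 0) &&
             (longer_seq.contains (PySem.List.pyGetD s (-1) 0) &&
              is_sublist_ultrafast s longer_seq)))))
          = (PySem.Set.contains (data.foldl (fun idx p =>
          if cl < p.1 then
            p.2.foldl (fun idx ls =>
              (PySem.Set.ofList (group.map (fun s => (s.length : Int)))).foldl (fun idx n =>
                (PySem.List.pyRange 0 ((ls.length : Int) - n + 1) 1).foldl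
                  (fun idx i => PySem.Set.add idx (PySem.List.slice ls (some i) (some (i + n)))) idx) idx) idx
          else idx) PySem.Set.empty) s) := Bool.eq_iff_iff.mpr (h1.trans h2.symm)
      rw [this]
  rw [hfil]
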